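-- pv_equiv track=rewrite | github.com/soulaimankaromi/PasswordStrengthEvaluator | passe.py | LongMaj
-- ===== SOURCE A (Python) =====
-- def LongMaj(passe):
--     C = 0
--     D = 0
--     for i in range(len(passe)):
--         if ord("A") <= ord(passe[i]) <= ord("Z"):
--             C += 1
--         else:
--             C = 0
--         if D < C:
--             D = C
--     return D
-- ===== SOURCE B (Python) =====
-- def LongMaj(passe):
--     best = 0
--     i = 0
--     n = len(passe)
--     while i < n:
--         if "A" <= passe[i] <= "Z":
--             j = i
--             while j < n and "A" <= passe[j] <= "Z":
--                 j += 1
--             best = max(best, j - i)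
--             i = j
--         else:
--             i += 1
--     return best
-- ===== Notes on version B (the rewrite author's own statement) =====
-- stated objective: alternative
-- what changed: B finds each maximal uppercase run with an inner two-pointer scan and takes the max of run lengths, instead of threading a running counter and running maximum through a single per-character loop.
import Mathlib
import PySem

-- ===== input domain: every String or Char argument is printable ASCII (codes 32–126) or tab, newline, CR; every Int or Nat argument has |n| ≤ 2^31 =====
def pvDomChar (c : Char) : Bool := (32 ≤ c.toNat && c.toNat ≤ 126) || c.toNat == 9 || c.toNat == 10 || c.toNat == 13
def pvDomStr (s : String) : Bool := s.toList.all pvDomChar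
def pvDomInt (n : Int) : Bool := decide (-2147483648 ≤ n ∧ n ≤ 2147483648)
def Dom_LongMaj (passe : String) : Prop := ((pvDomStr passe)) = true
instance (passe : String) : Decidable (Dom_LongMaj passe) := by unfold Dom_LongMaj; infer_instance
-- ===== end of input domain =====

-- B re-implements the longest-uppercase-run computation by extracting each maximal
-- uppercase run with an inner scan and maximising over run lengths (objective: alternative).

-- ===== PORT A =====
-- running counter C of the current uppercase run and running maximum D, one step per character
def LongMajStep (s : Int × Int) (c : Char) : Int × Int :=
  let C := if 65 ≤ c.toNat ∧ c.toNat ≤ 90 then s.1 + 1 else 0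
  (C, if s.2 < C then C else s.2)

def LongMaj (passe : String) : Int :=
  (passe.toList.foldl LongMajStep (0, 0)).2

-- ===== PORT B =====
def upChar (c : Char) : Bool := decide (65 ≤ c.toNat ∧ c.toNat ≤ 90)

-- outer loop of B: skip a non-upper char, or consume a whole maximal run (the inner scan)
def altGo : List Char → Int
  | [] => 0
  | c :: rest =>
    if upChar c then
      max (((c :: rest).takeWhile upChar).length : Int)
          (altGo ((c :: rest).dropWhile upChar))
    else altGo rest
termination_by cs => cs.length
decreasing_by
  · simp only [List.dropWhile_cons, *, if_pos]
    have := List.length_dropWhile_le upChar rest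
    simp; omega
  · simp

def LongMaj_alt (passe : String) : Int := altGo passe.toList

-- ===== PRECONDITION & SPEC =====
def Spec_LongMaj (passe : String) (out : Int) : Prop := out = LongMaj_alt passe
instance (passe : String) (out : Int) : Decidable (Spec_LongMaj passe out) := by unfold Spec_LongMaj; infer_instance

-- ===== CLAIM (what is proved, stated in full; the proofs are below) =====
def Claim_equal_LongMaj : Prop := ∀ (passe : String), Dom_LongMaj passe → Spec_LongMaj passe (LongMaj passe)

-- ===== LEMMAS AND PROOFS =====
theorem altGo_nonneg (cs : List Char) : 0 ≤ altGo cs := by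
  induction cs using altGo.induct with
  | case1 => simp [altGo]
  | case2 c rest h ih =>
    rw [altGo, if_pos h]
    exact le_max_of_le_right ih
  | case3 c rest h ih =>
    rw [altGo, if_neg h]
    exact ih

theorem altGo_eq_max (cs : List Char) :
    altGo cs = max ((cs.takeWhile upChar).length : Int) (altGo (cs.dropWhile upChar)) := by
  cases cs with
  | nil => simp [altGo]
  | cons c rest =>
    by_cases h : upChar c
    · rw [altGo, if_pos h]
    · rw [altGo, if_neg h, List.takeWhile_cons, List.dropWhile_cons]
      simp only [h, Bool.false_eq_true, if_false]
      have := altGo_nonneg (c :: rest)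
      have h2 : altGo (c :: rest) = altGo rest := by rw [altGo, if_neg h]
      simp [h2]; omega

theorem foldl_step_eq (cs : List Char) : ∀ (C D : Int), 0 ≤ C → C ≤ D →
    (cs.foldl LongMajStep (C, D)).2 =
      max D (max ((C + (cs.takeWhile upChar).length : Int)) (altGo (cs.dropWhile upChar))) := by
  induction cs with
  | nil => intro C D h0 h1; simp [altGo]; omega
  | cons c rest ih =>
    intro C D h0 h1
    by_cases h : upChar c
    · have hp : 65 ≤ c.toNat ∧ c.toNat ≤ 90 := by simpa [upChar] using h
      rw [List.foldl_cons]
      have : LongMajStep (C, D) c = (C + 1, if D < C + 1 then C + 1 else D) := by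
        simp [LongMajStep, hp]
      rw [this]
      rw [ih (C + 1) _ (by omega) (by split <;> omega)]
      rw [List.takeWhile_cons, List.dropWhile_cons]
      simp only [h, if_pos, List.length_cons]
      have t0 : (0:Int) ≤ (rest.takeWhile upChar).length := by positivity
      push_cast
      split <;> omega
    · have hp : ¬ (65 ≤ c.toNat ∧ c.toNat ≤ 90) := by simpa [upChar] using h
      rw [List.foldl_cons]
      have : LongMajStep (C, D) c = (0, if D < 0 then (0:Int) else D) := by
        simp [LongMajStep, hp]
      rw [this]
      have hD : (if D < (0:Int) then (0:Int) else D) = D := by omega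
      rw [hD, ih 0 D le_rfl (by omega)]
      rw [List.takeWhile_cons, List.dropWhile_cons]
      simp only [h, Bool.false_eq_true, if_false, List.length_nil, Nat.cast_zero]
      have h2 : altGo (c :: rest) = altGo rest := by rw [altGo, if_neg h]
      rw [altGo_eq_max rest] at h2
      omega

-- ===== VERDICT (by name: the statement is the Claim_ definition above) =====
theorem LongMaj_spec : Claim_equal_LongMaj := by
  intro passe _
  unfold Spec_LongMaj LongMaj LongMaj_alt
  rw [foldl_step_eq _ 0 0 le_rfl le_rfl]
  rw [altGo_eq_max passe.toList]
  have := altGo_nonneg (passe.toList.dropWhile upChar)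
  have t0 : (0:Int) ≤ (passe.toList.takeWhile upChar).length := by positivity
  omega
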